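-- pv_equiv track=rewrite | github.com/raistlin/dwcards | xtoh.py | hruler
-- ===== SOURCE A (Python) =====
-- def hruler(columns):
--     html='<tr class="hruler">'
--     html+='<td class="vruler">' +\
--           '</td>'
--     for column in range (0,columns):
--         html+='<td class="hruler">' +\
--               '<div class="hruler_left"><img src="img/color.png" class="color"/></div>' +\
--               '<div class="hruler_right"><img src="img/color.png" class="color"/></div>' +\
--               '</td>'
--         html+='<td class="vruler"></td>'
--     html+='</tr>'
--     return html
-- ===== SOURCE B (Python) =====
-- def hruler(columns):
--     block = ('<td class="hruler">'
--              '<div class="hruler_left"><img src="img/color.png" class="color"/></div>'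
--              '<div class="hruler_right"><img src="img/color.png" class="color"/></div>'
--              '</td>'
--              '<td class="vruler"></td>')
--     return '<tr class="hruler"><td class="vruler"></td>' + block * columns + '</tr>'
-- ===== Notes on version B (the rewrite author's own statement) =====
-- stated objective: simpler
-- what changed: Replaces the index loop that appends an identical fixed block each iteration with a closed form: the constant block defined once and repeated by string multiplication.
import Mathlib
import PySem

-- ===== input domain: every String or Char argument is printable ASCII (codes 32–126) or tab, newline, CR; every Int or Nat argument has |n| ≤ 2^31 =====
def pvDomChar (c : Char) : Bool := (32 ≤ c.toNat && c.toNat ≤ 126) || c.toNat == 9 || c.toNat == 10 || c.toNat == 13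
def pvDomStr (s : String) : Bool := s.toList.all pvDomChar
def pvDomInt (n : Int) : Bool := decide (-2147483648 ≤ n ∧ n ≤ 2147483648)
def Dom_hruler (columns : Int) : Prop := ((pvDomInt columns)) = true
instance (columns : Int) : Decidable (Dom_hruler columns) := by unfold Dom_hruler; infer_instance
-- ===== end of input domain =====

-- B replaces the loop that appends an identical fixed block per iteration with a
-- closed form: the constant block repeated by string multiplication (objective: simpler).

-- ===== PORT A =====
def hruler (columns : Int) : String :=
  let html := "<tr class=\"hruler\">"
  let html := html ++ "<td class=\"vruler\">" ++ "</td>"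
  let html := (PySem.List.pyRange 0 columns 1).foldl (fun html _ =>
    let html := html ++ "<td class=\"hruler\">" ++
      "<div class=\"hruler_left\"><img src=\"img/color.png\" class=\"color\"/></div>" ++
      "<div class=\"hruler_right\"><img src=\"img/color.png\" class=\"color\"/></div>" ++
      "</td>"
    html ++ "<td class=\"vruler\"></td>") html
  html ++ "</tr>"

-- ===== PORT B =====
def hruler_alt (columns : Int) : String :=
  let block := "<td class=\"hruler\">" ++
    "<div class=\"hruler_left\"><img src=\"img/color.png\" class=\"color\"/></div>" ++
    "<div class=\"hruler_right\"><img src=\"img/color.png\" class=\"color\"/></div>" ++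
    "</td>" ++
    "<td class=\"vruler\"></td>"
  -- Python 'block * columns' (empty for columns ≤ 0): replication, toNat clamps like Python
  "<tr class=\"hruler\"><td class=\"vruler\"></td>" ++ String.join (List.replicate columns.toNat block) ++ "</tr>"

-- ===== PRECONDITION & SPEC =====
def Spec_hruler (columns : Int) (out : String) : Prop := out = hruler_alt columns
instance (columns : Int) (out : String) : Decidable (Spec_hruler columns out) := by unfold Spec_hruler; infer_instance

-- ===== CLAIM (what is proved, stated in full; the proofs are below) =====
def Claim_equal_hruler : Prop := ∀ (columns : Int), Dom_hruler columns → Spec_hruler columns (hruler columns)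

-- ===== LEMMAS AND PROOFS =====
theorem foldl_join_shift (l : List String) (a : String) :
    l.foldl (· ++ ·) a = a ++ l.foldl (· ++ ·) "" := by
  induction l generalizing a with
  | nil => simp
  | cons x xs ih =>
      simp only [List.foldl]
      rw [ih, ih ("" ++ x)]
      simp [String.append_assoc]

theorem join_cons (b : String) (l : List String) :
    String.join (b :: l) = b ++ String.join l := by
  simp only [String.join, List.foldl]
  rw [foldl_join_shift]
  simp

theorem foldl_const_append {α : Type} (l : List α) (init blk : String) :
    l.foldl (fun h _ => h ++ blk) init = init ++ String.join (List.replicate l.length blk) := by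
  induction l generalizing init with
  | nil => simp [String.join]
  | cons x xs ih =>
      simp only [List.foldl, List.length_cons, List.replicate_succ]
      rw [ih]
      rw [join_cons, String.append_assoc]

-- ===== VERDICT (by name: the statement is the Claim_ definition above) =====
theorem hruler_spec : Claim_equal_hruler := by
  intro columns _
  show hruler columns = hruler_alt columns
  simp only [hruler, hruler_alt, String.append_assoc]
  rw [foldl_const_append]
  simp [PySem.List.length_pyRange_one, String.append_assoc]
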